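-- pv_equiv track=rewrite | github.com/zjunlp/DeepKE | build/lib/deepke/name_entity_re/cross/seq2seq/constraint_decoder/constraint_decoder.py | generated_search_src_sequence
-- ===== SOURCE A (Python) =====
-- def match_sublist(the_list, to_match):
--     """
--
--     :param the_list: [1, 2, 3, 4, 5, 6, 1, 2, 4, 5]
--     :param to_match:
--         [1, 2]
--     :return:
--         [(0, 1), (6, 7)]
--     """
--     len_to_match = len(to_match)
--     matched_list = list()
--     for index in range(len(the_list) - len_to_match + 1):
--         if to_match == the_list[index:index + len_to_match]:
--             matched_list += [(index, index + len_to_match - 1)]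
--     return matched_list
--
-- def generated_search_src_sequence(generated, src_sequence, end_sequence_search_tokens=None):
--
--     if len(generated) == 0:
--         # All src tokens are valid before generation
--         return src_sequence
--
--     matched_tuples = match_sublist(the_list=src_sequence, to_match=generated)
--
--     valid_token = list()
--     for _, end in matched_tuples:
--         next_index = end + 1
--         if next_index < len(src_sequence):
--             valid_token += [src_sequence[next_index]]
--
--     if end_sequence_search_tokens:
--         valid_token += end_sequence_search_tokens
--
--     return valid_token
-- ===== SOURCE B (Python) =====
-- def generated_search_src_sequence(generated, src_sequence, end_sequence_search_tokens=None):
--     if len(generated) == 0: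
--         return src_sequence
--
--     n = len(src_sequence)
--     # Column-wise candidate pruning: start with positions of the first token,
--     # then refine the candidate set one generated token at a time.
--     positions = [i for i, tok in enumerate(src_sequence) if tok == generated[0]]
--     for k, tok in enumerate(generated[1:], start=1):
--         positions = [i for i in positions if i + k < n and src_sequence[i + k] == tok]
--
--     m = len(generated)
--     valid_token = [src_sequence[i + m] for i in positions if i + m < n]
--
--     if end_sequence_search_tokens:
--         valid_token += end_sequence_search_tokens
--
--     return valid_token
-- ===== Notes on version B (the rewrite author's own statement) =====
-- stated objective: alternative
-- what changed: A slides a window over the source and compares a full slice at every position; B instead keeps a candidate set of start positions and prunes it column-wise, one generated token at a time, then reads off the successor tokens.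
import Mathlib
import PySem

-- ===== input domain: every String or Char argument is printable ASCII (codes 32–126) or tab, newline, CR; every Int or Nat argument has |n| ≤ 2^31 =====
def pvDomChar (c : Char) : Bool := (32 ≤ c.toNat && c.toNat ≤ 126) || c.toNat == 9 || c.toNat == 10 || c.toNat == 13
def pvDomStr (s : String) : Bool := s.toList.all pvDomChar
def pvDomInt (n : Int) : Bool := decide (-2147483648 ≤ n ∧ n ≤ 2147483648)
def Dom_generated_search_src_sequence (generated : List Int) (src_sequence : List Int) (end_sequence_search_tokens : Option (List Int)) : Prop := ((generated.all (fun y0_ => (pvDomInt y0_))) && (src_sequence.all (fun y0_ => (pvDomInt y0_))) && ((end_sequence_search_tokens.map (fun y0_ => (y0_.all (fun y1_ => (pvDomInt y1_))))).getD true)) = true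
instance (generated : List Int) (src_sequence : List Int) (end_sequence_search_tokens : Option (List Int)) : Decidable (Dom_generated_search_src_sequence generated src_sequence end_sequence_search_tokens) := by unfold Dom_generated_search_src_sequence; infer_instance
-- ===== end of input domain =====

-- B replaces A's position-by-position slice comparison with column-wise candidate pruning
-- (filter the set of start positions one generated token at a time); objective: alternative.

-- ===== PORT A =====
def match_sublist (the_list : List Int) (to_match : List Int) : List (Int × Int) :=
  let len_to_match : Int := to_match.length
  (PySem.List.pyRange 0 ((the_list.length : Int) - len_to_match + 1) 1).foldl
    (fun matched_list index =>
      if to_match = PySem.List.slice the_list (some index) (some (index + len_to_match))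
      then matched_list ++ [(index, index + len_to_match - 1)]
      else matched_list) []

def generated_search_src_sequence (generated : List Int) (src_sequence : List Int) (end_sequence_search_tokens : Option (List Int)) : List Int :=
  if generated.length = 0 then src_sequence
  else
    let matched_tuples := match_sublist src_sequence generated
    let valid_token := matched_tuples.foldl
      (fun valid_token t =>
        let next_index := t.2 + 1
        if next_index < (src_sequence.length : Int)
        then valid_token ++ [PySem.List.pyGetD src_sequence next_index 0]
        else valid_token) []
    match end_sequence_search_tokens with
    | some ts => if ts ≠ [] then valid_token ++ ts else valid_token
    | none => valid_token

-- ===== PORT B =====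
def generated_search_src_sequence_alt (generated : List Int) (src_sequence : List Int) (end_sequence_search_tokens : Option (List Int)) : List Int :=
  match generated with
  | [] => src_sequence
  | g0 :: gs =>
    let n : Int := src_sequence.length
    let positions0 : List Int :=
      ((PySem.List.enumerate src_sequence 0).filter (fun p => decide (p.2 = g0))).map (·.1)
    let positions := (PySem.List.enumerate gs 1).foldl
      (fun ps kt => ps.filter (fun i =>
        decide (i + kt.1 < n) && decide (PySem.List.pyGetD src_sequence (i + kt.1) 0 = kt.2)))
      positions0
    let m : Int := (gs.length : Int) + 1
    let valid_token := (positions.filter (fun i => decide (i + m < n))).map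
      (fun i => PySem.List.pyGetD src_sequence (i + m) 0)
    match end_sequence_search_tokens with
    | some ts => if ts ≠ [] then valid_token ++ ts else valid_token
    | none => valid_token

-- ===== PRECONDITION & SPEC =====
def Spec_generated_search_src_sequence (generated : List Int) (src_sequence : List Int) (end_sequence_search_tokens : Option (List Int)) (out : List Int) : Prop := out = generated_search_src_sequence_alt generated src_sequence end_sequence_search_tokens
instance (generated : List Int) (src_sequence : List Int) (end_sequence_search_tokens : Option (List Int)) (out : List Int) : Decidable (Spec_generated_search_src_sequence generated src_sequence end_sequence_search_tokens out) := by unfold Spec_generated_search_src_sequence; infer_instance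

-- ===== CLAIM (what is proved, stated in full; the proofs are below) =====
def Claim_equal_generated_search_src_sequence : Prop := ∀ (generated : List Int) (src_sequence : List Int) (end_sequence_search_tokens : Option (List Int)), Dom_generated_search_src_sequence generated src_sequence end_sequence_search_tokens → Spec_generated_search_src_sequence generated src_sequence end_sequence_search_tokens (generated_search_src_sequence generated src_sequence end_sequence_search_tokens)

-- ===== LEMMAS AND PROOFS =====

-- a fold of successive filters is one filter by the conjunction
theorem foldl_filter_all {α β : Type} (c : β → α → Bool) :
    ∀ (l : List β) (ps : List α),
      l.foldl (fun ps kt => ps.filter (c kt)) ps = ps.filter (fun i => l.all (fun kt => c kt i)) := by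
  intro l
  induction l with
  | nil => intro ps; simp
  | cons k t ih =>
      intro ps
      simp only [List.foldl_cons, ih, List.filter_filter]
      exact List.filter_congr (fun a _ => by simp [List.all_cons, Bool.and_comm])

-- extending the filtered range is harmless when the predicate fails on the extension
theorem filter_pyRange_ext (P : Int → Bool) (a b : Int) (hab : a ≤ b)
    (h : ∀ i : Int, a ≤ i → i < b → P i = false) :
    (PySem.List.pyRange 0 a 1).filter P = (PySem.List.pyRange 0 b 1).filter P := by
  by_cases ha : a ≤ 0
  · rw [PySem.List.pyRange_one_eq_nil ha]
    symm
    simp only [List.filter_nil, List.filter_eq_nil_iff]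
    intro i hi
    have hm := (PySem.List.mem_pyRange_one.mp hi)
    exact fun hP => by rw [h i (le_trans ha hm.1) hm.2] at hP; exact Bool.false_ne_true hP
  · push Not at ha
    rw [PySem.List.pyRange_one_append 0 a b (le_of_lt ha) hab, List.filter_append]
    have : (PySem.List.pyRange a b 1).filter P = [] := by
      simp only [List.filter_eq_nil_iff]
      intro i hi
      have hm := (PySem.List.mem_pyRange_one.mp hi)
      exact fun hP => by rw [h i hm.1 hm.2] at hP; exact Bool.false_ne_true hP
    rw [this, List.append_nil]

-- characterisation of list-equality with a take of a drop, elementwise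
theorem take_drop_eq_iff (l : List Int) :
    ∀ (src : List Int) (j : Nat), j + l.length ≤ src.length →
      (l = (src.drop j).take l.length ↔ ∀ k < l.length, src.getD (j + k) 0 = l.getD k 0) := by
  induction l with
  | nil => intro src j h; simp
  | cons a t ih =>
      intro src j h
      simp only [List.length_cons] at h ⊢
      have hj : j < src.length := by omega
      have hd : src.drop j = src[j] :: src.drop (j + 1) := (List.getElem_cons_drop hj).symm
      rw [hd, List.take_succ_cons, List.cons_eq_cons]
      have ih' := ih src (j + 1) (by omega)
      constructor
      · rintro ⟨h1, h2⟩ k hk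
        cases k with
        | zero => simpa [List.getD_eq_getElem?_getD, List.getElem?_eq_getElem hj] using h1.symm
        | succ k =>
            have hv := (ih'.mp h2) k (by omega)
            have e : j + (k + 1) = j + 1 + k := by omega
            rw [e]
            simpa using hv
      · intro hk
        refine ⟨?_, ih'.mpr ?_⟩
        · have h0 := hk 0 (by omega)
          simpa [List.getD_eq_getElem?_getD, List.getElem?_eq_getElem hj] using h0.symm
        · intro k hk2
          have hv := hk (k + 1) (by omega)
          have e : j + (k + 1) = j + 1 + k := by omega
          rw [e] at hv
          simpa using hv

-- the pointwise condition equivalence, under 0 ≤ i and i + m < n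
theorem cond_equiv (g0 : Int) (gs src : List Int) (i : Int) (hi : 0 ≤ i)
    (hm : i + ((gs.length : Int) + 1) < (src.length : Int)) :
    (g0 :: gs = PySem.List.slice src (some i) (some (i + ((gs.length : Int) + 1))) ↔
      (PySem.List.pyGetD src i 0 = g0 ∧
        ∀ kt ∈ PySem.List.enumerate gs 1,
          i + kt.1 < (src.length : Int) ∧ PySem.List.pyGetD src (i + kt.1) 0 = kt.2)) := by
  have hij : i = ((i.toNat : Nat) : Int) := (Int.toNat_of_nonneg hi).symm
  set j : Nat := i.toNat with hjdef
  have hb : j + (gs.length + 1) ≤ src.length := by omega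
  have hsl : PySem.List.slice src (some i) (some (i + ((gs.length : Int) + 1)))
      = (src.drop j).take ((g0 :: gs).length) := by
    rw [PySem.List.slice_toNat src hi (by omega)]
    simp only [List.length_cons]
    congr 1
    omega
  rw [hsl]
  have hchar := take_drop_eq_iff (g0 :: gs) src j (by simpa using hb)
  rw [hchar]
  simp only [List.length_cons]
  constructor
  · intro H
    refine ⟨?_, ?_⟩
    · have h0 := H 0 (by omega)
      rw [hij, PySem.List.pyGetD_natCast]
      simpa using h0
    · intro kt hkt
      obtain ⟨k, hk, rfl⟩ := (PySem.List.mem_enumerate_iff _ _ _).mp hkt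
      refine ⟨by omega, ?_⟩
      have hv := H (k + 1) (by omega)
      have e : i + (1 + (k : Int)) = (((j + 1 + k : Nat)) : Int) := by omega
      rw [e, PySem.List.pyGetD_natCast]
      have e2 : j + (k + 1) = j + 1 + k := by omega
      rw [e2] at hv
      simpa [List.getD_eq_getElem?_getD, List.getElem?_eq_getElem hk] using hv
  · rintro ⟨H0, H⟩ k hk
    cases k with
    | zero =>
        rw [hij, PySem.List.pyGetD_natCast] at H0
        simpa using H0
    | succ k =>
        have hkm : k < gs.length := by omega
        have hv := (H (1 + (k : Int), gs[k]) ((PySem.List.mem_enumerate_iff _ _ _).mpr ⟨k, hkm, rfl⟩)).2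
        have e : i + (1 + (k : Int)) = (((j + 1 + k : Nat)) : Int) := by omega
        rw [e, PySem.List.pyGetD_natCast] at hv
        have e2 : j + (k + 1) = j + 1 + k := by omega
        rw [e2]
        simpa [List.getD_eq_getElem?_getD, List.getElem?_eq_getElem hkm] using hv

-- the two loop nests compute the same token list
theorem core_eq (g0 : Int) (gs src : List Int) :
    List.foldl (fun valid_token t => if t.2 + 1 < (src.length : Int) then valid_token ++ [PySem.List.pyGetD src (t.2 + 1) 0] else valid_token) [] (match_sublist src (g0 :: gs))
    = (((PySem.List.enumerate gs 1).foldl (fun ps kt => ps.filter fun i => decide (i + kt.1 < (src.length : Int)) && decide (PySem.List.pyGetD src (i + kt.1) 0 = kt.2)) (((PySem.List.enumerate src 0).filter fun p => decide (p.2 = g0)).map (·.1))).filter fun i => decide (i + ((gs.length : Int) + 1) < (src.length : Int))).map fun i => PySem.List.pyGetD src (i + ((gs.length : Int) + 1)) 0 := by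
  -- A side: two append-if folds become filter/map over the index range
  simp only [match_sublist]
  rw [PySem.List.foldl_append_ite]
  rw [PySem.List.foldl_append_ite]
  simp only [List.nil_append, List.filter_map, List.map_map]
  -- B side: the fold of filters becomes one filter; positions0 becomes a filtered range
  rw [foldl_filter_all, PySem.List.enumerate_eq_map_pyRange (d := 0)]
  simp only [List.filter_map, List.map_map, PySem.List.len_eq]
  simp only [Function.comp_def]
  simp only [List.length_cons]
  push_cast
  have e : ∀ x : Int, x + ((gs.length : Int) + 1) - 1 + 1 = x + ((gs.length : Int) + 1) :=
    fun x => by ring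
  simp only [e]
  simp only [List.filter_filter]
  refine congrArg (List.map _) ?_
  have hext := filter_pyRange_ext
    (fun a => decide (a + ((gs.length : Int) + 1) < (src.length : Int)) &&
      decide (g0 :: gs = PySem.List.slice src (some a) (some (a + ((gs.length : Int) + 1)))))
    ((src.length : Int) - ((gs.length : Int) + 1) + 1) (src.length : Int) (by omega)
    (by
      intro i h1 h2
      have hno : ¬ (i + ((gs.length : Int) + 1) < (src.length : Int)) := by omega
      simp [hno])
  rw [hext]
  refine List.filter_congr ?_
  intro a ha
  obtain ⟨h0, hlt⟩ := PySem.List.mem_pyRange_one.mp ha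
  by_cases hc : a + ((gs.length : Int) + 1) < (src.length : Int)
  · have hiff := cond_equiv g0 gs src a h0 hc
    simp only [hc, decide_true]
    rw [Bool.eq_iff_iff]
    simp only [Bool.and_eq_true, decide_eq_true_eq, List.all_eq_true]
    rw [hiff]
    tauto
  · simp [hc]

-- ===== VERDICT (by name: the statement is the Claim_ definition above) =====
theorem generated_search_src_sequence_spec : Claim_equal_generated_search_src_sequence := by
  intro generated src opt _hdom
  unfold Spec_generated_search_src_sequence
  cases generated with
  | nil => cases opt <;> simp [generated_search_src_sequence, generated_search_src_sequence_alt]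
  | cons g0 gs =>
      simp only [generated_search_src_sequence, generated_search_src_sequence_alt,
        List.length_cons]
      rw [if_neg (by omega)]
      rw [core_eq]
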